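-- pv_equiv track=rewrite | github.com/dratcliff/advent-of-code | 2019/test_twenty.py | get_inner
-- ===== SOURCE A (Python) =====
-- from string import ascii_uppercase as uppercase
--
-- def get_portals(grid):
--     portals = {}
--
--     for k, v in grid.items():
--         u = (k[0], k[1]-1)
--         d = (k[0], k[1]+1)
--         f = (k[0]-1, k[1])
--         r = (k[0]+1, k[1])
--
--         uu = (u[0], u[1]-1)
--         dd = (d[0], d[1]+1)
--         ff = (f[0]-1, f[1])
--         rr = (r[0]+1, r[1])
--
--         if u in grid and grid[u] in uppercase:
--             if uu in grid and grid[uu] == ".":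
--                 key = grid[u]+v
--                 if key in portals:
--                     portals[key].append(uu)
--                 else:
--                     portals[key] = [uu]
--
--         if d in grid and grid[d] in uppercase:
--             if dd in grid and grid[dd] == ".":
--                 key = v + grid[d]
--                 if key in portals:
--                     portals[key].append(dd)
--                 else:
--                     portals[key] = [dd]
--
--         if f in grid and grid[f] in uppercase:
--             if ff in grid and grid[ff] == ".":
--                 key = grid[f] + v
--                 if key in portals:
--                     portals[key].append(ff)
--                 else:
--                     portals[key] = [ff]
--
--         if r in grid and grid[r] in uppercase:
--             if rr in grid and grid[rr] == ".":
--                 key = v + grid[r]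
--                 if key in portals:
--                     portals[key].append(rr)
--                 else:
--                     portals[key] = [rr]
--
--     return portals
--
-- def get_inner(text):
--     grid = {(j, i): w for i, v in enumerate(text) for j, w in enumerate(v)}
--     portals = get_portals(grid)
--     for p in portals:
--         if p in ("AA", "ZZ"):
--             for p1 in portals[p]:
--                 grid[p1] = "#"
--     return grid
-- ===== SOURCE B (Python) =====
-- def get_inner(text):
--     grid = {(j, i): w for i, v in enumerate(text) for j, w in enumerate(v)}
--
--     def labelled(j, i):
--         return any(grid.get((j + dj, i + di)) == grid.get((j + 2 * dj, i + 2 * di)) == L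
--                    for dj, di in ((0, 1), (0, -1), (1, 0), (-1, 0)) for L in "AZ")
--
--     return {c: "#" if w == "." and labelled(*c) else w for c, w in grid.items()}
-- ===== Notes on version B (the rewrite author's own statement) =====
-- stated objective: simpler
-- what changed: B drops A's intermediate portals dictionary (built from every cell and then filtered for 'AA'/'ZZ') and instead builds the result dict in one comprehension, marking each '.' cell whose two outward neighbours in one of the four directions are the same 'A' or 'Z' letter.
import Mathlib
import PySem

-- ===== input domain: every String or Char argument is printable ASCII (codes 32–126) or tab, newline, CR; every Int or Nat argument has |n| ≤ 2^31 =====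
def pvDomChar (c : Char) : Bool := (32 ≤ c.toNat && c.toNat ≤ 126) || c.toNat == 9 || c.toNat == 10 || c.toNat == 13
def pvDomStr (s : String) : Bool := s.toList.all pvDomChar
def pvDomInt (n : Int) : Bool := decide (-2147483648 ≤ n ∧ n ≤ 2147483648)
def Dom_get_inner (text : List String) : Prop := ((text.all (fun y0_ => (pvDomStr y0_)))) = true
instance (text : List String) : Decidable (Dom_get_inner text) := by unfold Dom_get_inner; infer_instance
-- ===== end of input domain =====

-- B replaces A's portals dictionary (built over every cell and then filtered to AA/ZZ) by a direct
-- scan that marks each '.' cell whose two outward neighbours in some direction are the same 'A'/'Z'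
-- letter; same return value, different decomposition (objective: simpler).

-- ===== PORT A =====
-- the grid-building dict comprehension, shared verbatim by both ports
def pyGridOfText (text : List String) : PySem.Dict (Int × Int) String :=
  (PySem.List.enumerate text).foldl (fun g iv =>
    (PySem.List.enumerate iv.2.toList).foldl
      (fun g jw => g.insert (jw.1, iv.1) (String.singleton jw.2)) g) PySem.Dict.empty

def pyUppercase : String := "ABCDEFGHIJKLMNOPQRSTUVWXYZ"

-- 'if key in portals: portals[key].append(c) else: portals[key] = [c]'
def addPortal (portals : PySem.Dict String (List (Int × Int))) (key : String) (c : Int × Int) :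
    PySem.Dict String (List (Int × Int)) :=
  if portals.contains key then portals.modify key [] (fun l => l ++ [c]) else portals.insert key [c]

-- one of the four symmetric 'if nb in grid and grid[nb] in uppercase: if outc in grid and grid[outc] == ".": …' blocks
def portalCheck (grid : PySem.Dict (Int × Int) String) (portals : PySem.Dict String (List (Int × Int)))
    (nb outc : Int × Int) (mkKey : String → String) : PySem.Dict String (List (Int × Int)) :=
  match grid.get? nb with
  | some s =>
    if PySem.Str.isIn s pyUppercase then
      match grid.get? outc with
      | some t => if t == "." then addPortal portals (mkKey s) outc else portals
      | none => portals
    else portals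
  | none => portals

def get_portals (grid : PySem.Dict (Int × Int) String) : PySem.Dict String (List (Int × Int)) :=
  grid.items.foldl (fun portals kv =>
    portalCheck grid
      (portalCheck grid
        (portalCheck grid
          (portalCheck grid portals (kv.1.1, kv.1.2 - 1) (kv.1.1, kv.1.2 - 2) (fun s => s ++ kv.2))
          (kv.1.1, kv.1.2 + 1) (kv.1.1, kv.1.2 + 2) (fun s => kv.2 ++ s))
        (kv.1.1 - 1, kv.1.2) (kv.1.1 - 2, kv.1.2) (fun s => s ++ kv.2))
      (kv.1.1 + 1, kv.1.2) (kv.1.1 + 2, kv.1.2) (fun s => kv.2 ++ s)) PySem.Dict.empty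

def get_inner (text : List String) : List (Int × Int × String) :=
  let grid := pyGridOfText text
  let portals := get_portals grid
  let grid2 := portals.keys.foldl (fun g p =>
    if p == "AA" || p == "ZZ" then (portals.getD p []).foldl (fun g c => g.insert c "#") g else g) grid
  grid2.items.map (fun q => (q.1.1, q.1.2, q.2))

-- ===== PORT B =====
def pyDirs : List (Int × Int) := [(0, 1), (0, -1), (1, 0), (-1, 0)]

def labelled (grid : PySem.Dict (Int × Int) String) (j i : Int) : Bool :=
  pyDirs.any (fun d => ("AZ".toList).any (fun L =>
    (grid.get? (j + d.1, i + d.2) == grid.get? (j + 2 * d.1, i + 2 * d.2)) &&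
    (grid.get? (j + 2 * d.1, i + 2 * d.2) == some (String.singleton L))))

def get_inner_alt (text : List String) : List (Int × Int × String) :=
  let grid := pyGridOfText text
  let grid2 := grid.items.foldl (fun d q =>
    d.insert q.1 (if q.2 == "." && labelled grid q.1.1 q.1.2 then "#" else q.2)) PySem.Dict.empty
  grid2.items.map (fun q => (q.1.1, q.1.2, q.2))

-- ===== PRECONDITION & SPEC =====
def Spec_get_inner (text : List String) (out : List (Int × Int × String)) : Prop := out = get_inner_alt text
instance (text : List String) (out : List (Int × Int × String)) : Decidable (Spec_get_inner text out) := by unfold Spec_get_inner; infer_instance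

-- ===== CLAIM (what is proved, stated in full; the proofs are below) =====
def Claim_equal_get_inner : Prop := ∀ (text : List String), Dom_get_inner text → Spec_get_inner text (get_inner text)

-- ===== LEMMAS AND PROOFS =====

-- the (key, marked-cell) pairs one of the four blocks would record
def contrib1 (grid : PySem.Dict (Int × Int) String) (nb outc : Int × Int) (mkKey : String → String) :
    List (String × (Int × Int)) :=
  match grid.get? nb with
  | some s =>
    if PySem.Str.isIn s pyUppercase then
      match grid.get? outc with
      | some t => if t == "." then [(mkKey s, outc)] else []
      | none => []
    else []
  | none => []

-- all (key, marked-cell) pairs one grid item records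
def contribs (grid : PySem.Dict (Int × Int) String) (kv : (Int × Int) × String) :
    List (String × (Int × Int)) :=
  contrib1 grid (kv.1.1, kv.1.2 - 1) (kv.1.1, kv.1.2 - 2) (fun s => s ++ kv.2) ++
  contrib1 grid (kv.1.1, kv.1.2 + 1) (kv.1.1, kv.1.2 + 2) (fun s => kv.2 ++ s) ++
  contrib1 grid (kv.1.1 - 1, kv.1.2) (kv.1.1 - 2, kv.1.2) (fun s => s ++ kv.2) ++
  contrib1 grid (kv.1.1 + 1, kv.1.2) (kv.1.1 + 2, kv.1.2) (fun s => kv.2 ++ s)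

-- the list of cells A's final loop marks with '#'
def marksA (grid : PySem.Dict (Int × Int) String) : List (Int × Int) :=
  ((get_portals grid).keys.filter (fun p => p == "AA" || p == "ZZ")).flatMap
    (fun p => (get_portals grid).getD p [])

lemma addPortal_eq_modify (portals : PySem.Dict String (List (Int × Int))) (key : String) (c : Int × Int) :
    addPortal portals key c = portals.modify key [] (fun l => l ++ [c]) := by
  rw [addPortal]
  split_ifs with h
  · rfl
  · rw [PySem.Dict.modify, PySem.Dict.getD_of_not_contains _ _ (by simpa using h)]
    simp

lemma portalCheck_eq_foldl (grid : PySem.Dict (Int × Int) String) (portals : PySem.Dict String (List (Int × Int)))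
    (nb outc : Int × Int) (mkKey : String → String) :
    portalCheck grid portals nb outc mkKey =
      (contrib1 grid nb outc mkKey).foldl (fun ps p => ps.modify p.1 [] (fun l => l ++ [p.2])) portals := by
  cases hnb : grid.get? nb with
  | none => simp only [portalCheck, contrib1, hnb, List.foldl_nil]
  | some s =>
    simp only [portalCheck, contrib1, hnb]
    split_ifs with hs
    · cases ho : grid.get? outc with
      | none => simp
      | some t =>
        dsimp only
        split_ifs with ht
        · simp [addPortal_eq_modify]
        · simp
    · simp

lemma get_portals_getD (grid : PySem.Dict (Int × Int) String) (key : String) :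
    (get_portals grid).getD key [] =
      ((grid.items.flatMap (contribs grid)).filter (fun p => p.1 == key)).map (fun p => p.2) := by
  have hfun : ∀ (ps : PySem.Dict String (List (Int × Int))) (kv : (Int × Int) × String),
      kv ∈ grid.items →
      (portalCheck grid
        (portalCheck grid
          (portalCheck grid
            (portalCheck grid ps (kv.1.1, kv.1.2 - 1) (kv.1.1, kv.1.2 - 2) (fun s => s ++ kv.2))
            (kv.1.1, kv.1.2 + 1) (kv.1.1, kv.1.2 + 2) (fun s => kv.2 ++ s))
          (kv.1.1 - 1, kv.1.2) (kv.1.1 - 2, kv.1.2) (fun s => s ++ kv.2))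
        (kv.1.1 + 1, kv.1.2) (kv.1.1 + 2, kv.1.2) (fun s => kv.2 ++ s)) =
      (contribs grid kv).foldl (fun ps p => ps.modify p.1 [] (fun l => l ++ [p.2])) ps := by
    intro ps kv _
    simp [contribs, portalCheck_eq_foldl, List.foldl_append]
  have h2 : get_portals grid =
      (grid.items.flatMap (contribs grid)).foldl
        (fun ps p => ps.modify p.1 [] (fun l => l ++ [p.2])) PySem.Dict.empty := by
    rw [get_portals, List.foldl_flatMap]
    exact PySem.List.foldl_congr_mem _ _ _ _ hfun
  rw [h2, PySem.Dict.getD_foldl_modify_append, PySem.Dict.getD_empty]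
  simp

lemma mem_get_portals_getD (grid : PySem.Dict (Int × Int) String) (key : String) (c : Int × Int) :
    c ∈ (get_portals grid).getD key [] ↔ ∃ kv ∈ grid.items, (key, c) ∈ contribs grid kv := by
  rw [get_portals_getD]
  simp only [List.mem_map, List.mem_filter, List.mem_flatMap, beq_iff_eq]
  constructor
  · rintro ⟨p, ⟨⟨kv, hkv, hp⟩, hkey⟩, rfl⟩
    exact ⟨kv, hkv, by rwa [show (key, p.2) = p from Prod.ext hkey.symm rfl]⟩
  · rintro ⟨kv, hkv, hp⟩
    exact ⟨(key, c), ⟨⟨kv, hkv, hp⟩, rfl⟩, rfl⟩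

lemma mem_marksA (grid : PySem.Dict (Int × Int) String) (c : Int × Int) :
    c ∈ marksA grid ↔ (∃ kv ∈ grid.items, ("AA", c) ∈ contribs grid kv) ∨
      (∃ kv ∈ grid.items, ("ZZ", c) ∈ contribs grid kv) := by
  rw [marksA]
  simp only [List.mem_flatMap, List.mem_filter]
  constructor
  · rintro ⟨p, ⟨hpk, hp⟩, hc⟩
    rcases (by simpa using hp : p = "AA" ∨ p = "ZZ") with rfl | rfl
    · exact Or.inl ((mem_get_portals_getD grid _ c).1 hc)
    · exact Or.inr ((mem_get_portals_getD grid _ c).1 hc)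
  · intro h
    have key : ∀ p : String, (p = "AA" ∨ p = "ZZ") → c ∈ (get_portals grid).getD p [] →
        ∃ p', (p' ∈ (get_portals grid).keys ∧ (p' == "AA" || p' == "ZZ") = true) ∧
          c ∈ (get_portals grid).getD p' [] := by
      intro p hp hc
      have hcont : (get_portals grid).contains p = true := by
        by_contra hct
        rw [PySem.Dict.getD_of_not_contains _ _ (by simpa using hct)] at hc
        exact (List.not_mem_nil).elim hc
      refine ⟨p, ⟨(PySem.Dict.contains_iff_mem_keys _ _).1 hcont, ?_⟩, hc⟩
      rcases hp with rfl | rfl <;> simp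
    rcases h with h | h
    · exact key "AA" (Or.inl rfl) ((mem_get_portals_getD grid _ c).2 h)
    · exact key "ZZ" (Or.inr rfl) ((mem_get_portals_getD grid _ c).2 h)

lemma mem_contrib1 (grid : PySem.Dict (Int × Int) String) (nb outc : Int × Int) (mkKey : String → String)
    (key : String) (c : Int × Int) :
    (key, c) ∈ contrib1 grid nb outc mkKey ↔
      ∃ s, grid.get? nb = some s ∧ PySem.Str.isIn s pyUppercase = true ∧
        grid.get? outc = some "." ∧ key = mkKey s ∧ c = outc := by
  cases hnb : grid.get? nb with
  | none => simp [contrib1, hnb]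
  | some s =>
    simp only [contrib1, hnb]
    split_ifs with hs
    · cases ho : grid.get? outc with
      | none => simp
      | some t =>
        dsimp only
        split_ifs with ht
        · replace ht : t = "." := by simpa using ht
          subst ht
          simp only [List.mem_singleton, Prod.mk.injEq]
          constructor
          · rintro ⟨rfl, rfl⟩
            exact ⟨s, rfl, hs, by trivial, by trivial, by trivial⟩
          · rintro ⟨s', hs', -, -, rfl, rfl⟩
            injection hs' with h
            exact ⟨by rw [h], rfl⟩
        · simp only [List.not_mem_nil, false_iff]
          rintro ⟨s', hs', -, ho', -, -⟩
          injection ho' with h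
          exact (show t ≠ "." from by simpa using ht) h
    · simp only [List.not_mem_nil, false_iff]
      rintro ⟨s', hs', hup, -, -, -⟩
      injection hs' with h
      subst h
      exact hs hup

lemma items_foldl_mark (cs : List (Int × Int)) (d : PySem.Dict (Int × Int) String)
    (h : ∀ c ∈ cs, d.contains c = true) :
    (cs.foldl (fun g c => g.insert c "#") d).items =
      d.items.map (fun q => if q.1 ∈ cs then (q.1, "#") else q) := by
  induction cs generalizing d with
  | nil => simp
  | cons c cs ih =>
    rw [List.foldl_cons,
      ih _ (fun c' hc' => by
        rw [PySem.Dict.contains_insert]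
        simp [h c' (List.mem_cons_of_mem _ hc')]),
      PySem.Dict.items_insert_of_contains _ _ (h c List.mem_cons_self), List.map_map]
    refine List.map_congr_left (fun q _ => ?_)
    by_cases hqc : q.1 = c
    · simp [hqc]
    · by_cases hqcs : q.1 ∈ cs <;> simp [hqc, hqcs]

lemma grid_nodup (text : List String) : (pyGridOfText text).keys.Nodup := by
  have outer : ∀ (L : List (Int × String)) (g : PySem.Dict (Int × Int) String), g.keys.Nodup →
      ((L.foldl (fun g iv => (PySem.List.enumerate iv.2.toList).foldl
        (fun g jw => g.insert (jw.1, iv.1) (String.singleton jw.2)) g) g)).keys.Nodup := by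
    intro L
    induction L with
    | nil => intro g h; exact h
    | cons a L ih =>
      intro g h
      exact ih _ (PySem.Dict.nodup_keys_foldl_insert_key _ _ _ _ h)
  exact outer _ _ PySem.Dict.nodup_keys_empty

lemma grid_singleton (text : List String) :
    ∀ p ∈ (pyGridOfText text).items, ∃ ch, p.2 = String.singleton ch := by
  have inner : ∀ (l : List (Int × Char)) (i : Int) (g : PySem.Dict (Int × Int) String),
      (∀ p ∈ g.items, ∃ ch, p.2 = String.singleton ch) →
      ∀ p ∈ (l.foldl (fun g jw => g.insert (jw.1, i) (String.singleton jw.2)) g).items,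
        ∃ ch, p.2 = String.singleton ch := by
    intro l i
    induction l with
    | nil => intro g h; exact h
    | cons a l ih =>
      intro g h
      refine ih _ (fun p hp => ?_)
      rcases (PySem.Dict.mem_items_insert _ _ _ _).1 hp with rfl | ⟨hp, -⟩
      · exact ⟨a.2, rfl⟩
      · exact h _ hp
  have outer : ∀ (L : List (Int × String)) (g : PySem.Dict (Int × Int) String),
      (∀ p ∈ g.items, ∃ ch, p.2 = String.singleton ch) →
      ∀ p ∈ ((L.foldl (fun g iv => (PySem.List.enumerate iv.2.toList).foldl
        (fun g jw => g.insert (jw.1, iv.1) (String.singleton jw.2)) g) g)).items,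
        ∃ ch, p.2 = String.singleton ch := by
    intro L
    induction L with
    | nil => intro g h; exact h
    | cons a L ih =>
      intro g h
      exact ih _ (inner _ _ _ h)
  exact outer _ _ (by simp [PySem.Dict.empty])

lemma singleton_append_eq (a b c : Char) :
    String.singleton a ++ String.singleton b = String.singleton c ++ String.singleton c ↔
      a = c ∧ b = c := by
  constructor
  · intro h
    have := congrArg String.toList h
    simp at this
    exact this
  · rintro ⟨rfl, rfl⟩
    rfl

lemma labelled_of (grid : PySem.Dict (Int × Int) String) (j i : Int) (d : Int × Int)
    (hd : d ∈ pyDirs) (L : Char) (hL : L = 'A' ∨ L = 'Z')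
    (h1 : grid.get? (j + d.1, i + d.2) = some (String.singleton L))
    (h2 : grid.get? (j + 2 * d.1, i + 2 * d.2) = some (String.singleton L)) :
    labelled grid j i = true := by
  rw [labelled]
  refine List.any_eq_true.2 ⟨d, hd, List.any_eq_true.2 ⟨L, ?_, ?_⟩⟩
  · rcases hL with rfl | rfl <;> decide
  · rw [h1, h2]
    simp

lemma markKey_forward (grid : PySem.Dict (Int × Int) String) (hnd : grid.keys.Nodup)
    (hsing : ∀ p ∈ grid.items, ∃ ch, p.2 = String.singleton ch)
    (Lc : Char) (hL : Lc = 'A' ∨ Lc = 'Z') (c : Int × Int)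
    (h : ∃ kv ∈ grid.items, (String.singleton Lc ++ String.singleton Lc, c) ∈ contribs grid kv) :
    grid.get? c = some "." ∧ labelled grid c.1 c.2 = true := by
  obtain ⟨⟨⟨k1, k2⟩, v⟩, hkv, hmem⟩ := h
  have hkvget : grid.get? (k1, k2) = some v := PySem.Dict.get?_of_mem_items grid hkv hnd
  obtain ⟨b, hb⟩ := hsing _ hkv
  rw [contribs] at hmem
  simp only [List.mem_append] at hmem
  rcases hmem with ((h1 | h1) | h1) | h1 <;>
    obtain ⟨s, hnb, -, hout, hkey, rfl⟩ := (mem_contrib1 grid _ _ _ _ _).1 h1 <;>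
    obtain ⟨a, ha⟩ := hsing _ ((PySem.Dict.get?_eq_some_iff_mem_items grid _ _ hnd).1 hnb) <;>
    refine ⟨hout, ?_⟩ <;> dsimp only at *
  · rw [ha, hb] at hkey
    obtain ⟨ha2, hb2⟩ := (singleton_append_eq a b Lc).1 hkey.symm
    exact labelled_of grid k1 (k2 - 2) (0, 1) (by decide) Lc hL
      (by rw [show (k1 + (0 : Int), k2 - 2 + (1 : Int)) = (k1, k2 - 1) from by rw [Prod.mk.injEq]; exact ⟨by omega, by omega⟩, hnb, ha, ha2])
      (by rw [show (k1 + 2 * (0 : Int), k2 - 2 + 2 * (1 : Int)) = (k1, k2) from by rw [Prod.mk.injEq]; exact ⟨by omega, by omega⟩,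
        hkvget, hb, hb2])
  · rw [ha, hb] at hkey
    obtain ⟨hb2, ha2⟩ := (singleton_append_eq b a Lc).1 hkey.symm
    exact labelled_of grid k1 (k2 + 2) (0, -1) (by decide) Lc hL
      (by rw [show (k1 + (0 : Int), k2 + 2 + (-1 : Int)) = (k1, k2 + 1) from by rw [Prod.mk.injEq]; exact ⟨by omega, by omega⟩, hnb, ha, ha2])
      (by rw [show (k1 + 2 * (0 : Int), k2 + 2 + 2 * (-1 : Int)) = (k1, k2) from by rw [Prod.mk.injEq]; exact ⟨by omega, by omega⟩,
        hkvget, hb, hb2])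
  · rw [ha, hb] at hkey
    obtain ⟨ha2, hb2⟩ := (singleton_append_eq a b Lc).1 hkey.symm
    exact labelled_of grid (k1 - 2) k2 (1, 0) (by decide) Lc hL
      (by rw [show (k1 - 2 + (1 : Int), k2 + (0 : Int)) = (k1 - 1, k2) from by rw [Prod.mk.injEq]; exact ⟨by omega, by omega⟩, hnb, ha, ha2])
      (by rw [show (k1 - 2 + 2 * (1 : Int), k2 + 2 * (0 : Int)) = (k1, k2) from by rw [Prod.mk.injEq]; exact ⟨by omega, by omega⟩,
        hkvget, hb, hb2])
  · rw [ha, hb] at hkey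
    obtain ⟨hb2, ha2⟩ := (singleton_append_eq b a Lc).1 hkey.symm
    exact labelled_of grid (k1 + 2) k2 (-1, 0) (by decide) Lc hL
      (by rw [show (k1 + 2 + (-1 : Int), k2 + (0 : Int)) = (k1 + 1, k2) from by rw [Prod.mk.injEq]; exact ⟨by omega, by omega⟩, hnb, ha, ha2])
      (by rw [show (k1 + 2 + 2 * (-1 : Int), k2 + 2 * (0 : Int)) = (k1, k2) from by rw [Prod.mk.injEq]; exact ⟨by omega, by omega⟩,
        hkvget, hb, hb2])

lemma mark_iff (grid : PySem.Dict (Int × Int) String) (hnd : grid.keys.Nodup)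
    (hsing : ∀ p ∈ grid.items, ∃ ch, p.2 = String.singleton ch)
    (c : Int × Int) (w : String) (hmem : (c, w) ∈ grid.items) :
    c ∈ marksA grid ↔ (w = "." ∧ labelled grid c.1 c.2 = true) := by
  have hget : grid.get? c = some w := PySem.Dict.get?_of_mem_items grid hmem hnd
  constructor
  · intro hc
    rw [mem_marksA] at hc
    have main : grid.get? c = some "." ∧ labelled grid c.1 c.2 = true := by
      rcases hc with h | h
      · exact markKey_forward grid hnd hsing 'A' (Or.inl rfl) c
          (by rw [show String.singleton 'A' ++ String.singleton 'A' = "AA" from by decide]; exact h)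
      · exact markKey_forward grid hnd hsing 'Z' (Or.inr rfl) c
          (by rw [show String.singleton 'Z' ++ String.singleton 'Z' = "ZZ" from by decide]; exact h)
    rw [hget] at main
    exact ⟨Option.some.inj main.1, main.2⟩
  · rintro ⟨rfl, hlab⟩
    obtain ⟨c1, c2⟩ := c
    rw [labelled] at hlab
    obtain ⟨d, hd, h2⟩ := List.any_eq_true.1 hlab
    obtain ⟨L, hLmem, h3⟩ := List.any_eq_true.1 h2
    have hL : L = 'A' ∨ L = 'Z' := by simpa using hLmem
    rw [Bool.and_eq_true] at h3
    have hn2 : grid.get? (c1 + 2 * d.1, c2 + 2 * d.2) = some (String.singleton L) := by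
      simpa using h3.2
    have hn1 : grid.get? (c1 + d.1, c2 + d.2) = some (String.singleton L) := by
      rw [show grid.get? ((c1, c2).1 + d.1, (c1, c2).2 + d.2) =
        grid.get? ((c1, c2).1 + 2 * d.1, (c1, c2).2 + 2 * d.2) from by simpa using h3.1]
      exact hn2
    have hkv2 : ((c1 + 2 * d.1, c2 + 2 * d.2), String.singleton L) ∈ grid.items :=
      (PySem.Dict.get?_eq_some_iff_mem_items grid _ _ hnd).1 hn2
    rw [mem_marksA]
    have hd4 : d = ((0 : Int), (1 : Int)) ∨ d = (0, -1) ∨ d = (1, 0) ∨ d = (-1, 0) := by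
      simpa [pyDirs] using hd
    have hkeyA : String.singleton L ++ String.singleton L = (if L = 'A' then "AA" else "ZZ") := by
      rcases hL with rfl | rfl <;> decide
    have build : ∀ key : String, key = String.singleton L ++ String.singleton L →
        ∃ kv ∈ grid.items, (key, (c1, c2)) ∈ contribs grid kv := by
      intro key hkeydef
      refine ⟨_, hkv2, ?_⟩
      rw [contribs]
      simp only [List.mem_append]
      rcases hd4 with rfl | rfl | rfl | rfl
      · refine Or.inl (Or.inl (Or.inl ((mem_contrib1 grid _ _ _ _ _).2
          ⟨String.singleton L, ?_, ?_, ?_, ?_, ?_⟩)))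
        · rw [show ((c1 + 2 * (0 : Int), c2 + 2 * (1 : Int)).1,
            (c1 + 2 * (0 : Int), c2 + 2 * (1 : Int)).2 - 1) = (c1 + (0 : Int), c2 + (1 : Int)) from
            by rw [Prod.mk.injEq]; exact ⟨by omega, by omega⟩]
          exact hn1
        · rcases hL with rfl | rfl <;> decide
        · rw [show ((c1 + 2 * (0 : Int), c2 + 2 * (1 : Int)).1,
            (c1 + 2 * (0 : Int), c2 + 2 * (1 : Int)).2 - 2) = ((c1 : Int), (c2 : Int)) from
            by rw [Prod.mk.injEq]; exact ⟨by omega, by omega⟩]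
          exact hget
        · rw [hkeydef]
        · rw [Prod.mk.injEq]; exact ⟨by omega, by omega⟩
      · refine Or.inl (Or.inl (Or.inr ((mem_contrib1 grid _ _ _ _ _).2
          ⟨String.singleton L, ?_, ?_, ?_, ?_, ?_⟩)))
        · rw [show ((c1 + 2 * (0 : Int), c2 + 2 * (-1 : Int)).1,
            (c1 + 2 * (0 : Int), c2 + 2 * (-1 : Int)).2 + 1) = (c1 + (0 : Int), c2 + (-1 : Int)) from
            by rw [Prod.mk.injEq]; exact ⟨by omega, by omega⟩]
          exact hn1
        · rcases hL with rfl | rfl <;> decide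
        · rw [show ((c1 + 2 * (0 : Int), c2 + 2 * (-1 : Int)).1,
            (c1 + 2 * (0 : Int), c2 + 2 * (-1 : Int)).2 + 2) = ((c1 : Int), (c2 : Int)) from
            by rw [Prod.mk.injEq]; exact ⟨by omega, by omega⟩]
          exact hget
        · rw [hkeydef]
        · rw [Prod.mk.injEq]; exact ⟨by omega, by omega⟩
      · refine Or.inl (Or.inr ((mem_contrib1 grid _ _ _ _ _).2
          ⟨String.singleton L, ?_, ?_, ?_, ?_, ?_⟩))
        · rw [show ((c1 + 2 * (1 : Int), c2 + 2 * (0 : Int)).1 - 1,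
            (c1 + 2 * (1 : Int), c2 + 2 * (0 : Int)).2) = (c1 + (1 : Int), c2 + (0 : Int)) from
            by rw [Prod.mk.injEq]; exact ⟨by omega, by omega⟩]
          exact hn1
        · rcases hL with rfl | rfl <;> decide
        · rw [show ((c1 + 2 * (1 : Int), c2 + 2 * (0 : Int)).1 - 2,
            (c1 + 2 * (1 : Int), c2 + 2 * (0 : Int)).2) = ((c1 : Int), (c2 : Int)) from
            by rw [Prod.mk.injEq]; exact ⟨by omega, by omega⟩]
          exact hget
        · rw [hkeydef]
        · rw [Prod.mk.injEq]; exact ⟨by omega, by omega⟩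
      · refine Or.inr ((mem_contrib1 grid _ _ _ _ _).2
          ⟨String.singleton L, ?_, ?_, ?_, ?_, ?_⟩)
        · rw [show ((c1 + 2 * (-1 : Int), c2 + 2 * (0 : Int)).1 + 1,
            (c1 + 2 * (-1 : Int), c2 + 2 * (0 : Int)).2) = (c1 + (-1 : Int), c2 + (0 : Int)) from
            by rw [Prod.mk.injEq]; exact ⟨by omega, by omega⟩]
          exact hn1
        · rcases hL with rfl | rfl <;> decide
        · rw [show ((c1 + 2 * (-1 : Int), c2 + 2 * (0 : Int)).1 + 2,
            (c1 + 2 * (-1 : Int), c2 + 2 * (0 : Int)).2) = ((c1 : Int), (c2 : Int)) from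
            by rw [Prod.mk.injEq]; exact ⟨by omega, by omega⟩]
          exact hget
        · rw [hkeydef]
        · rw [Prod.mk.injEq]; exact ⟨by omega, by omega⟩
    rcases hL with rfl | rfl
    · exact Or.inl (build "AA" (by decide))
    · exact Or.inr (build "ZZ" (by decide))

lemma contribs_dot {grid : PySem.Dict (Int × Int) String} {kv : (Int × Int) × String}
    {key : String} {c : Int × Int} (h : (key, c) ∈ contribs grid kv) :
    grid.get? c = some "." := by
  rw [contribs] at h
  simp only [List.mem_append] at h
  rcases h with ((h | h) | h) | h <;>
    (obtain ⟨s, -, -, hout, -, rfl⟩ := (mem_contrib1 grid _ _ _ _ _).1 h; exact hout)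

lemma marksA_contains (grid : PySem.Dict (Int × Int) String) :
    ∀ c ∈ marksA grid, grid.contains c = true := by
  intro c hc
  have hdot : grid.get? c = some "." := by
    rcases (mem_marksA grid c).1 hc with ⟨kv, -, hmem⟩ | ⟨kv, -, hmem⟩ <;> exact contribs_dot hmem
  rw [PySem.Dict.contains_eq_isSome_get?, hdot]
  rfl

-- ===== VERDICT (by name: the statement is the Claim_ definition above) =====
theorem get_inner_spec : Claim_equal_get_inner := by
  intro text _
  unfold Spec_get_inner
  rw [get_inner, get_inner_alt]
  have hnd : (pyGridOfText text).keys.Nodup := grid_nodup text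
  rw [PySem.List.foldl_if_eq_foldl_filter
      (fun p : String => p == "AA" || p == "ZZ")
      (fun (g : PySem.Dict (Int × Int) String) (p : String) =>
        ((get_portals (pyGridOfText text)).getD p []).foldl (fun g c => g.insert c "#") g),
    ← List.foldl_flatMap,
    show (List.flatMap (fun p => (get_portals (pyGridOfText text)).getD p [])
        (List.filter (fun p => p == "AA" || p == "ZZ") (get_portals (pyGridOfText text)).keys)) =
      marksA (pyGridOfText text) from rfl,
    items_foldl_mark _ _ (marksA_contains (pyGridOfText text)),
    PySem.Dict.items_foldl_insert_fresh (pyGridOfText text).items (fun q => q.1)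
      (fun q => if q.2 == "." && labelled (pyGridOfText text) q.1.1 q.1.2 then "#" else q.2)
      PySem.Dict.empty (fun a _ => PySem.Dict.contains_empty _)
      (by simpa [PySem.Dict.keys] using hnd)]
  simp only [List.map_map, PySem.Dict.empty, List.nil_append]
  refine List.map_congr_left (fun q hq => ?_)
  have hmem' : (q.1, q.2) ∈ (pyGridOfText text).items := by simpa using hq
  have hiff := mark_iff (pyGridOfText text) hnd (grid_singleton text) q.1 q.2 hmem'
  by_cases hcond : q.2 = "." ∧ labelled (pyGridOfText text) q.1.1 q.1.2 = true
  · have hmark : q.1 ∈ marksA (pyGridOfText text) := hiff.2 hcond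
    simp [hmark, hcond.1, hcond.2]
  · have hmark : q.1 ∉ marksA (pyGridOfText text) := fun hm => hcond (hiff.1 hm)
    simp [hmark]
    intro h1 h2
    exact absurd ⟨h1, h2⟩ hcond
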